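-- pv_equiv track=rewrite | github.com/veryfansome/germ | germ/services/bot/chat/classifier.py | extract_pos_label_groups
-- ===== SOURCE A (Python) =====
-- def extract_pos_label_groups(labels: list[str], target_labels: set[str] = None):
--     """
--     Given a list of labels (e.g. ["X", "X", "NN", "NN", "X", "X", "NNS", "X"]) and target labels
--     (e.g. [NN, NNS, NNP, NNPS]), this function will return a list of consecutive index grouping of target labels.
--
--     For example, given:
--         ["O", "O", "NN", "NN", "O", "O", "NNS", "O"]
--     this function would return:
--         [[2, 3], [6]]
--
--     Args:
--         labels (list of str): Token labels
--         target_labels (set of str): The set of tags to target.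
--
--     Returns:
--         list of lists of int: A list where each sub-list contains consecutive indices
--                               of labels that match NN, NNS, NNP, NNPS.
--     """
--     groups = []
--     current_group = []
--     for idx, label in enumerate(labels):
--         if (label in target_labels) if target_labels is not None else label != "X":
--             # If current_group is empty or the current idx is consecutive (i.e., previous index + 1),
--             # append to current_group. Otherwise, start a new group.
--             if current_group and idx == current_group[-1] + 1:
--                 current_group.append(idx)
--             else:
--                 if current_group:
--                     groups.append(current_group)
--                 current_group = [idx]
--         else:
--             if current_group:
--                 groups.append(current_group)
--                 current_group = []
--     # If there's an open group at the end, add it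
--     if current_group:
--         groups.append(current_group)
--     return groups
-- ===== SOURCE B (Python) =====
-- def extract_pos_label_groups(labels: list[str], target_labels: set[str] = None):
--     # Stage 1: indices of matching labels.
--     if target_labels is not None:
--         idxs = [i for i, label in enumerate(labels) if label in target_labels]
--     else:
--         idxs = [i for i, label in enumerate(labels) if label != "X"]
--     # Stage 2: consecutive indices share the arithmetic key i - rank, so bucketing
--     # by that key groups exactly the maximal consecutive runs, in order.
--     groups = {}
--     for pos, i in enumerate(idxs):
--         groups.setdefault(i - pos, []).append(i)
--     return list(groups.values())
-- ===== Notes on version B (the rewrite author's own statement) =====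
-- stated objective: alternative
-- what changed: B replaces A's single accumulator loop with manual run detection/flush by two stages with no run logic at all: first filter out the matching indices, then bucket them in a dict keyed by the arithmetic invariant index-minus-rank (constant exactly on a maximal consecutive run) and return the dict's values.
import Mathlib
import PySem

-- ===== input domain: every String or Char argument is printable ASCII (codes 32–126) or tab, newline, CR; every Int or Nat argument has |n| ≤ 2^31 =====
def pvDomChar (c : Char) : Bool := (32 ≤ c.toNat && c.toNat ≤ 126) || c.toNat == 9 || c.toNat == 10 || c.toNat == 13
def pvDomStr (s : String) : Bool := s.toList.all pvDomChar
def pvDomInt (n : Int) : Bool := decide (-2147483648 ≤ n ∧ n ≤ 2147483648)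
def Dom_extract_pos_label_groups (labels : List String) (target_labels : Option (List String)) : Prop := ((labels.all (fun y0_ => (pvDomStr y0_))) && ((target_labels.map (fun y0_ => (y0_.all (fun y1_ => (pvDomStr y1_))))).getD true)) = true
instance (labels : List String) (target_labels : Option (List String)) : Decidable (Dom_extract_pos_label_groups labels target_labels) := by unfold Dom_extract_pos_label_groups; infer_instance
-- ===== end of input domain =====

-- B groups matching indices without any run detection: it filters the matching indices
-- and buckets them by the arithmetic key (index - rank); same O(n) cost, alternative algorithm.

-- the match condition of the Python source: `(label in target_labels) if target_labels is not None else label != "X"`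
def pvKeep (target_labels : Option (List String)) (p : Int × String) : Bool :=
  match target_labels with
  | some t => t.contains p.2
  | none => p.2 != "X"

-- ===== PORT A =====
-- loop body of A's for-loop over enumerate(labels): state = (groups, current_group)
def pvStepA (target_labels : Option (List String))
    (st : List (List Int) × List Int) (p : Int × String) : List (List Int) × List Int :=
  if pvKeep target_labels p then
    if st.2 ≠ [] ∧ p.1 = (st.2.getLast?.getD 0) + 1 then
      (st.1, st.2 ++ [p.1])
    else
      ((if st.2 ≠ [] then st.1 ++ [st.2] else st.1), [p.1])
  else
    if st.2 ≠ [] then (st.1 ++ [st.2], []) else st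

-- final flush after the loop
def pvFinishA (st : List (List Int) × List Int) : List (List Int) :=
  if st.2 ≠ [] then st.1 ++ [st.2] else st.1

def extract_pos_label_groups (labels : List String) (target_labels : Option (List String)) : List (List Int) :=
  pvFinishA ((PySem.List.enumerate labels 0).foldl (pvStepA target_labels) ([], []))

-- ===== PORT B =====
-- Source B stage 2 loop body: groups.setdefault(i - pos, []).append(i)  ==  modify (i-pos) [] (· ++ [i])
def pvStepB (d : PySem.Dict Int (List Int)) (p : Int × Int) : PySem.Dict Int (List Int) :=
  d.modify (p.2 - p.1) ([] : List Int) (fun g => g ++ [p.2])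

def extract_pos_label_groups_alt (labels : List String) (target_labels : Option (List String)) : List (List Int) :=
  let idxs : List Int :=
    match target_labels with
    | some t => ((PySem.List.enumerate labels 0).filter (fun p => t.contains p.2)).map Prod.fst
    | none => ((PySem.List.enumerate labels 0).filter (fun p => p.2 != "X")).map Prod.fst
  ((PySem.List.enumerate idxs 0).foldl pvStepB PySem.Dict.empty).values

-- ===== PRECONDITION & SPEC =====
def Spec_extract_pos_label_groups (labels : List String) (target_labels : Option (List String)) (out : List (List Int)) : Prop := out = extract_pos_label_groups_alt labels target_labels
instance (labels : List String) (target_labels : Option (List String)) (out : List (List Int)) : Decidable (Spec_extract_pos_label_groups labels target_labels out) := by unfold Spec_extract_pos_label_groups; infer_instance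

-- ===== CLAIM (what is proved, stated in full; the proofs are below) =====
def Claim_equal_extract_pos_label_groups : Prop := ∀ (labels : List String) (target_labels : Option (List String)), Dom_extract_pos_label_groups labels target_labels → Spec_extract_pos_label_groups labels target_labels (extract_pos_label_groups labels target_labels)

-- ===== LEMMAS AND PROOFS =====

-- the common reference value: the maximal consecutive runs of a list of indices,
-- built back-to-front; pvGlue cur b gs prepends cur, merging with the first group iff it starts at b
def pvGlue (cur : List Int) (b : Int) : List (List Int) → List (List Int)
  | (y :: g) :: gs => if y = b then (cur ++ y :: g) :: gs else cur :: (y :: g) :: gs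
  | gs => cur :: gs

def pvSplit : List Int → List (List Int)
  | [] => []
  | x :: xs => pvGlue [x] (x + 1) (pvSplit xs)

-- strictly increasing with all elements ≥ b
def pvInc (b : Int) : List Int → Prop
  | [] => True
  | x :: xs => b ≤ x ∧ pvInc (x + 1) xs

-- the filtered index list, with a generalized start index
def pvF (tl : Option (List String)) (ls : List String) (i : Int) : List Int :=
  (((PySem.List.enumerate ls i).filter (pvKeep tl)).map Prod.fst)

-- pvInc is monotone in the bound
theorem pvInc_mono {b b' : Int} {xs : List Int} (h : pvInc b xs) (hle : b' ≤ b) : pvInc b' xs := by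
  cases xs with
  | nil => trivial
  | cons x xs => exact ⟨le_trans hle h.1, h.2⟩

theorem pvF_inc (tl : Option (List String)) : ∀ (ls : List String) (i : Int), pvInc i (pvF tl ls i) := by
  intro ls
  induction ls with
  | nil => intro i; simp [pvF, PySem.List.enumerate, pvInc]
  | cons s ls' ih =>
      intro i
      by_cases hk : pvKeep tl (i, s) = true
      · have hF : pvF tl (s :: ls') i = i :: pvF tl ls' (i + 1) := by
          simp [pvF, PySem.List.enumerate_cons, hk]
        rw [hF]
        exact ⟨le_refl i, ih (i + 1)⟩
      · have hF : pvF tl (s :: ls') i = pvF tl ls' (i + 1) := by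
          simp [pvF, PySem.List.enumerate_cons, hk]
        rw [hF]
        exact pvInc_mono (ih (i + 1)) (by omega)

-- pvSplit of a nonempty list starts with its head
theorem pvSplit_shape (x : Int) (xs : List Int) :
    ∃ t gs, pvSplit (x :: xs) = (x :: t) :: gs := by
  show ∃ t gs, pvGlue [x] (x + 1) (pvSplit xs) = (x :: t) :: gs
  cases hS : pvSplit xs with
  | nil => exact ⟨[], [], by simp [pvGlue]⟩
  | cons g gs =>
      cases g with
      | nil => exact ⟨[], [] :: gs, by simp [pvGlue]⟩
      | cons y g' =>
          by_cases hy : y = x + 1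
          · exact ⟨y :: g', gs, by simp [pvGlue, hy]⟩
          · exact ⟨[], (y :: g') :: gs, by simp [pvGlue, hy]⟩

-- gluing below the least element is a plain cons
theorem pvGlue_lt (cur : List Int) {b b' : Int} {xs : List Int}
    (h : pvInc b xs) (hlt : b' < b) : pvGlue cur b' (pvSplit xs) = cur :: pvSplit xs := by
  cases xs with
  | nil => simp [pvSplit, pvGlue]
  | cons x xs' =>
      obtain ⟨t, gs, hsh⟩ := pvSplit_shape x xs'
      rw [hsh, pvGlue]
      have : ¬ x = b' := by have := h.1; omega
      simp [this]

-- glue composition: absorbing the next consecutive element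
theorem pvGlue_comp (cur : List Int) (x : Int) (S : List (List Int)) :
    pvGlue cur x (pvGlue [x] (x + 1) S) = pvGlue (cur ++ [x]) (x + 1) S := by
  cases S with
  | nil => simp [pvGlue]
  | cons g gs =>
      cases g with
      | nil => simp [pvGlue]
      | cons y g' =>
          by_cases hy : y = x + 1
          · simp [pvGlue, hy]
          · simp [pvGlue, hy]

-- ---------- A-side invariant ----------
theorem pv_mainA (tl : Option (List String)) :
    ∀ (ls : List String) (i : Int) (groups : List (List Int)) (cur : List Int),
      (pvFinishA ((PySem.List.enumerate ls i).foldl (pvStepA tl) (groups, [])) =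
        groups ++ pvSplit (pvF tl ls i))
      ∧ (cur ≠ [] → cur.getLast? = some (i - 1) →
          pvFinishA ((PySem.List.enumerate ls i).foldl (pvStepA tl) (groups, cur)) =
            groups ++ pvGlue cur i (pvSplit (pvF tl ls i))) := by
  intro ls
  induction ls with
  | nil =>
      intro i groups cur
      refine ⟨by simp [PySem.List.enumerate, pvF, pvSplit, pvFinishA], ?_⟩
      intro hne _
      simp [PySem.List.enumerate, pvF, pvSplit, pvGlue, pvFinishA, hne]
  | cons s ls' ih =>
      intro i groups cur
      constructor
      · by_cases hk : pvKeep tl (i, s) = true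
        · have hstep : pvStepA tl (groups, ([] : List Int)) (i, s) = (groups, [i]) := by
            simp [pvStepA, hk]
          rw [PySem.List.enumerate_cons, List.foldl_cons, hstep]
          have h2 := (ih (i + 1) groups [i]).2 (by simp) (by simp)
          rw [h2]
          simp [pvF, PySem.List.enumerate_cons, hk, pvSplit]
        · have hstep : pvStepA tl (groups, ([] : List Int)) (i, s) = (groups, []) := by
            simp [pvStepA, hk]
          rw [PySem.List.enumerate_cons, List.foldl_cons, hstep]
          rw [(ih (i + 1) groups []).1]
          simp [pvF, PySem.List.enumerate_cons, hk]
      · intro hne hlast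
        by_cases hk : pvKeep tl (i, s) = true
        · have hstep : pvStepA tl (groups, cur) (i, s) = (groups, cur ++ [i]) := by
            simp only [pvStepA, hk, if_true, hlast]
            simp [hne]
          rw [PySem.List.enumerate_cons, List.foldl_cons, hstep]
          have h2 := (ih (i + 1) groups (cur ++ [i])).2 (by simp)
            (by rw [List.getLast?_concat]; congr 1; omega)
          rw [h2]
          have hF : pvF tl (s :: ls') i = i :: pvF tl ls' (i + 1) := by
            simp [pvF, PySem.List.enumerate_cons, hk]
          rw [hF]
          show groups ++ pvGlue (cur ++ [i]) (i + 1) (pvSplit (pvF tl ls' (i + 1)))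
            = groups ++ pvGlue cur i (pvSplit (i :: pvF tl ls' (i + 1)))
          rw [pvSplit, pvGlue_comp]
        · have hstep : pvStepA tl (groups, cur) (i, s) = (groups ++ [cur], []) := by
            simp [pvStepA, hk, hne]
          rw [PySem.List.enumerate_cons, List.foldl_cons, hstep]
          rw [(ih (i + 1) (groups ++ [cur]) []).1]
          have hF : pvF tl (s :: ls') i = pvF tl ls' (i + 1) := by
            simp [pvF, PySem.List.enumerate_cons, hk]
          rw [hF, pvGlue_lt cur (pvF_inc tl ls' (i + 1)) (by omega)]
          simp

-- ---------- B-side invariant ----------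

-- lookups below the frontier fail
theorem pv_find_none (its : List (Int × List Int)) (k : Int)
    (h : ∀ q ∈ its, q.1 < k) : its.find? (fun p => p.1 == k) = none := by
  apply List.find?_eq_none.2
  intro q hq
  have := h q hq
  simp; omega

theorem pv_mainB :
    ∀ (idxs : List Int) (b pos : Int), pvInc b idxs →
      (∀ (its : List (Int × List Int)), (∀ q ∈ its, q.1 < b - pos) →
        ((PySem.List.enumerate idxs pos).foldl pvStepB (PySem.Dict.mk its)).values =
          its.map Prod.snd ++ pvSplit idxs)
      ∧ (∀ (its : List (Int × List Int)) (cur : List Int), cur ≠ [] →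
          (∀ q ∈ its, q.1 < b - pos) →
        ((PySem.List.enumerate idxs pos).foldl pvStepB
            (PySem.Dict.mk (its ++ [(b - pos, cur)]))).values =
          its.map Prod.snd ++ pvGlue cur b (pvSplit idxs)) := by
  intro idxs
  induction idxs with
  | nil =>
      intro b pos _
      constructor
      · intro its _; simp [PySem.List.enumerate, PySem.Dict.values, pvSplit]
      · intro its cur hne _
        simp [PySem.List.enumerate, PySem.Dict.values, pvSplit, pvGlue]
  | cons x xs ih =>
      intro b pos hinc
      have hbx : b ≤ x := hinc.1
      have hinc' : pvInc (x + 1) xs := hinc.2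
      constructor
      · intro its hlt
        rw [PySem.List.enumerate_cons, List.foldl_cons]
        have hkey : ∀ q ∈ its, q.1 < x - pos := fun q hq => by have := hlt q hq; omega
        have hstep : pvStepB (PySem.Dict.mk its) (pos, x) =
            PySem.Dict.mk (its ++ [(x - pos, [x])]) := by
          have hget : (PySem.Dict.mk its).getD (x - pos) ([] : List Int) = [] := by
            simp [PySem.Dict.getD, PySem.Dict.get?, pv_find_none its _ hkey]
          have hcon : (PySem.Dict.mk its).contains (x - pos) = false := by
            rw [PySem.Dict.contains_eq_isSome_get?]
            simp [PySem.Dict.get?, pv_find_none its _ hkey]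
          simp only [pvStepB, PySem.Dict.modify, hget]
          ext : 1
          rw [PySem.Dict.items_insert_of_not_contains _ _ hcon]
          simp
        rw [hstep]
        have h2 := (ih (x + 1) (pos + 1) hinc').2 its [x] (by simp)
          (fun q hq => by have := hkey q hq; omega)
        have he : x - pos = x + 1 - (pos + 1) := by omega
        rw [he] at hstep ⊢
        rw [h2]
        rfl
      · intro its cur hne hlt
        rw [PySem.List.enumerate_cons, List.foldl_cons]
        by_cases hx : x = b
        · -- consecutive: same key, extend the last bucket
          subst hx
          have hget : (PySem.Dict.mk (its ++ [(x - pos, cur)])).getD (x - pos) ([] : List Int) = cur := by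
            simp [PySem.Dict.getD, PySem.Dict.get?, List.find?_append, pv_find_none its _ hlt]
          have hstep : pvStepB (PySem.Dict.mk (its ++ [(x - pos, cur)])) (pos, x) =
              PySem.Dict.mk (its ++ [(x - pos, cur ++ [x])]) := by
            have hcon : (PySem.Dict.mk (its ++ [(x - pos, cur)])).contains (x - pos) = true := by
              rw [PySem.Dict.contains_eq_isSome_get?]
              simp [PySem.Dict.get?, List.find?_append, pv_find_none its _ hlt]
            simp only [pvStepB, PySem.Dict.modify, hget]
            ext : 1
            rw [PySem.Dict.items_insert_of_contains _ _ hcon]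
            rw [List.map_append]
            congr 1
            · conv_rhs => rw [← List.map_id its]
              apply List.map_congr_left
              intro q hq
              have hql := hlt q hq
              have hne' : (q.1 == x - pos) = false := by simp; omega
              simp [hne']
            · simp
          rw [hstep]
          have h2 := (ih (x + 1) (pos + 1) hinc').2 its (cur ++ [x]) (by simp)
            (fun q hq => by have := hlt q hq; omega)
          have he : x - pos = x + 1 - (pos + 1) := by omega
          rw [he]
          rw [h2]
          rw [pvSplit, pvGlue_comp]
        · -- gap: fresh larger key, new bucket appended
          have hbx' : b < x := by omega
          have hlt' : ∀ q ∈ its ++ [(b - pos, cur)], q.1 < x - pos := by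
            intro q hq
            rcases List.mem_append.1 hq with h | h
            · have := hlt q h; omega
            · simp at h; subst h; simp; omega
          have hstep : pvStepB (PySem.Dict.mk (its ++ [(b - pos, cur)])) (pos, x) =
              PySem.Dict.mk ((its ++ [(b - pos, cur)]) ++ [(x - pos, [x])]) := by
            have hget : (PySem.Dict.mk (its ++ [(b - pos, cur)])).getD (x - pos) ([] : List Int) = [] := by
              simp [PySem.Dict.getD, PySem.Dict.get?, pv_find_none _ _ hlt']
            have hcon : (PySem.Dict.mk (its ++ [(b - pos, cur)])).contains (x - pos) = false := by
              rw [PySem.Dict.contains_eq_isSome_get?]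
              simp [PySem.Dict.get?, pv_find_none _ _ hlt']
            simp only [pvStepB, PySem.Dict.modify, hget]
            ext : 1
            rw [PySem.Dict.items_insert_of_not_contains _ _ hcon]
            simp
          rw [hstep]
          have h2 := (ih (x + 1) (pos + 1) hinc').2 (its ++ [(b - pos, cur)]) [x] (by simp)
            (fun q hq => by have := hlt' q hq; omega)
          have he : x - pos = x + 1 - (pos + 1) := by omega
          rw [he]
          rw [h2]
          obtain ⟨t, gs, hsh⟩ := pvSplit_shape x xs
          have hgl : pvGlue cur b (pvSplit (x :: xs)) = cur :: pvSplit (x :: xs) := by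
            rw [hsh, pvGlue]
            simp [hx]
          have hS : pvGlue [x] (x + 1) (pvSplit xs) = pvSplit (x :: xs) := rfl
          rw [hS, hgl]
          simp

-- ===== VERDICT (by name: the statement is the Claim_ definition above) =====
theorem extract_pos_label_groups_spec : Claim_equal_extract_pos_label_groups := by
  intro labels target_labels _
  have hA := (pv_mainA target_labels labels 0 [] []).1
  have hB := (pv_mainB (pvF target_labels labels 0) 0 0 (pvF_inc target_labels labels 0)).1 [] (by simp)
  unfold Spec_extract_pos_label_groups extract_pos_label_groups extract_pos_label_groups_alt
  cases target_labels <;> exact hA.trans hB.symm
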